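-- pv_equiv track=rewrite | github.com/Sumiinix/ultra-super-miracle | enjambment_analyzer.py | identify_poetic_devices
-- ===== SOURCE A (Python) =====
-- from typing import List, Dict, Tuple, Optional, Set, Union
-- from collections import defaultdict, Counter
--
-- def identify_poetic_devices(poem_text: str) -> Dict[str, int]:
--     """Identify various poetic devices in the text"""
--     devices = {
--         'alliteration': 0,
--         'assonance': 0,
--         'consonance': 0,
--         'repetition': 0,
--         'metaphor': 0,
--     }
--
--     words = poem_text.lower().split()
--
--     # Simple alliteration detection
--     for i in range(len(words) - 2):
--         if (words[i][0] == words[i+1][0] == words[i+2][0]):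
--             devices['alliteration'] += 1
--
--     # Simple repetition detection
--     word_counts = Counter(words)
--     devices['repetition'] = sum(1 for count in word_counts.values() if count > 2)
--
--     return devices
-- ===== SOURCE B (Python) =====
-- from collections import Counter
-- from itertools import groupby
--
-- def identify_poetic_devices(poem_text: str):
--     """Identify various poetic devices in the text (run-length decomposition)."""
--     words = poem_text.lower().split()
--     # A maximal run of L consecutive words sharing a first letter contains
--     # exactly max(L - 2, 0) adjacent equal triples.
--     alliteration = sum(max(len(list(group)) - 2, 0)
--                        for _, group in groupby(words, key=lambda w: w[0]))
--     repetition = sum(1 for count in Counter(words).values() if count > 2)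
--     return {
--         'alliteration': alliteration,
--         'assonance': 0,
--         'consonance': 0,
--         'repetition': repetition,
--         'metaphor': 0,
--     }
-- ===== Notes on version B (the rewrite author's own statement) =====
-- stated objective: alternative
-- what changed: Alliteration is counted by grouping the word list into maximal runs of equal first letters (itertools.groupby) and adding max(L-2,0) per run, instead of A's sliding triple-window index loop; the result dict is built directly as a literal.
import Mathlib
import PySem

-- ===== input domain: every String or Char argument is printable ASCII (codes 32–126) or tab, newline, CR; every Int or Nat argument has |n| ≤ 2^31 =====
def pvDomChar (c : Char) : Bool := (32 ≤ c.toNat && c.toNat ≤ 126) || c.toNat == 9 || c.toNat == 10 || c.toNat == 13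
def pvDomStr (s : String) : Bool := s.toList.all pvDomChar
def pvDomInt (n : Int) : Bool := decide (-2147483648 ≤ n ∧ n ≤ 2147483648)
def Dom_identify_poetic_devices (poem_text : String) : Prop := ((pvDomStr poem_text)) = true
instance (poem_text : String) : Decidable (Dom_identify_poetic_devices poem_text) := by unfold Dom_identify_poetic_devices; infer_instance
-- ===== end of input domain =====

-- B counts alliteration by maximal runs of equal first letters (max(L-2,0) per run) instead of A's
-- sliding triple-window index loop; same results, same O(n) cost ("alternative", not claimed faster).

-- ===== PORT A =====
-- words[i][0] : none = IndexError (unreachable: split() yields non-empty words and i is in range)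
def pvFirst (words : List String) (i : Int) : Option Char :=
  (PySem.List.pyGet? words i).bind (fun w => PySem.Str.pyGet? w 0)

def identify_poetic_devices (poem_text : String) : List (String × Int) :=
  let devices : PySem.Dict String Int :=
    PySem.Dict.ofList [("alliteration", 0), ("assonance", 0), ("consonance", 0), ("repetition", 0), ("metaphor", 0)]
  let words := PySem.Str.split₀ (PySem.Str.lower poem_text)
  let devices := (PySem.List.pyRange 0 ((words.length : Int) - 2) 1).foldl
    (fun d i =>
      if pvFirst words i = pvFirst words (i+1) ∧ pvFirst words (i+1) = pvFirst words (i+2)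
      then d.modify "alliteration" 0 (· + 1) else d) devices
  let word_counts := PySem.Dict.counter words
  let devices := devices.insert "repetition"
    (word_counts.values.foldl (fun acc c => if c > 2 then acc + 1 else acc) 0)
  devices.items

-- ===== PORT B =====
-- run lengths of maximal blocks of consecutive equal elements (itertools.groupby + len)
def pvRunLengthsAux {α : Type} [DecidableEq α] : α → Nat → List α → List Nat
  | _, n, [] => [n]
  | a, n, x :: xs => if x = a then pvRunLengthsAux a (n+1) xs else n :: pvRunLengthsAux x 1 xs

def pvRunLengths {α : Type} [DecidableEq α] : List α → List Nat
  | [] => []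
  | x :: xs => pvRunLengthsAux x 1 xs

def identify_poetic_devices_alt (poem_text : String) : List (String × Int) :=
  let words := PySem.Str.split₀ (PySem.Str.lower poem_text)
  -- key w[0] ported as PySem.Str.pyGet? w 0 (none = IndexError, unreachable for split() words)
  let alliteration : Int :=
    ((pvRunLengths (words.map (fun w => PySem.Str.pyGet? w 0))).map
      (fun L => max ((L : Int) - 2) 0)).sum
  let repetition : Int :=
    (PySem.Dict.counter words).values.foldl (fun acc c => if c > 2 then acc + 1 else acc) 0
  [("alliteration", alliteration), ("assonance", 0), ("consonance", 0),
   ("repetition", repetition), ("metaphor", 0)]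

-- ===== PRECONDITION & SPEC =====
def Spec_identify_poetic_devices (poem_text : String) (out : List (String × Int)) : Prop := out = identify_poetic_devices_alt poem_text
instance (poem_text : String) (out : List (String × Int)) : Decidable (Spec_identify_poetic_devices poem_text out) := by unfold Spec_identify_poetic_devices; infer_instance

-- ===== CLAIM (what is proved, stated in full; the proofs are below) =====
def Claim_equal_identify_poetic_devices : Prop := ∀ (poem_text : String), Dom_identify_poetic_devices poem_text → Spec_identify_poetic_devices poem_text (identify_poetic_devices poem_text)

-- ===== LEMMAS AND PROOFS =====

-- the device dict of A with a variable alliteration count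
def mkDev (v : Int) : PySem.Dict String Int :=
  PySem.Dict.mk [("alliteration", v), ("assonance", 0), ("consonance", 0), ("repetition", 0), ("metaphor", 0)]

theorem modify_mkDev (v : Int) : (mkDev v).modify "alliteration" 0 (· + 1) = mkDev (v + 1) := by
  simp [mkDev, PySem.Dict.modify, PySem.Dict.getD, PySem.Dict.get?, PySem.Dict.insert, PySem.Dict.contains]

theorem foldl_mkDev (p : Int → Prop) [DecidablePred p] (l : List Int) (v : Int) :
    l.foldl (fun d i => if p i then d.modify "alliteration" 0 (· + 1) else d) (mkDev v)
      = mkDev (v + (l.countP (fun i => decide (p i)) : Int)) := by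
  induction l generalizing v with
  | nil => simp
  | cons x xs ih =>
    simp only [List.foldl_cons, List.countP_cons]
    by_cases h : p x
    · rw [if_pos h, modify_mkDev, ih]
      simp [h]; ring_nf
    · rw [if_neg h, ih]
      simp [h]

theorem items_insert_mkDev (v r : Int) :
    ((mkDev v).insert "repetition" r).items
      = [("alliteration", v), ("assonance", 0), ("consonance", 0), ("repetition", r), ("metaphor", 0)] := by
  simp [mkDev, PySem.Dict.insert, PySem.Dict.contains]

-- number of adjacent equal triples (what A's window loop counts), structurally
def countTriples {α : Type} [DecidableEq α] : List α → Int
  | a :: b :: c :: rest => (if a = b ∧ b = c then 1 else 0) + countTriples (b :: c :: rest)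
  | _ => 0

theorem countTriples_cons_ne {α : Type} [DecidableEq α] (a b : α) (xs : List α) (h : a ≠ b) :
    countTriples (a :: b :: xs) = countTriples (b :: xs) := by
  cases xs <;> simp [countTriples, h]

theorem countTriples_replicate {α : Type} [DecidableEq α] (a : α) :
    ∀ n, countTriples (List.replicate n a) = max ((n : Int) - 2) 0
  | 0 => by simp [countTriples]
  | 1 => by simp [countTriples]
  | 2 => by simp [countTriples]
  | n+3 => by
    have ih := countTriples_replicate a (n+2)
    have h3 : List.replicate (n+3) a = a :: a :: a :: List.replicate n a := by
      simp [List.replicate_succ]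
    have h2 : a :: a :: List.replicate n a = List.replicate (n+2) a := by
      simp [List.replicate_succ]
    rw [h3]
    simp only [countTriples]
    rw [if_pos (by simp), h2, ih]
    push_cast; omega

theorem countTriples_boundary {α : Type} [DecidableEq α] (a x : α) (xs : List α) (hax : a ≠ x) :
    ∀ n, countTriples (List.replicate n a ++ x :: xs) = max ((n : Int) - 2) 0 + countTriples (x :: xs)
  | 0 => by simp
  | 1 => by simp [countTriples_cons_ne a x xs hax]
  | 2 => by
    cases xs <;> simp [countTriples, hax]
  | n+3 => by
    have ih := countTriples_boundary a x xs hax (n+2)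
    have h3 : List.replicate (n+3) a ++ x :: xs = a :: a :: a :: (List.replicate n a ++ x :: xs) := by
      simp [List.replicate_succ]
    have h2 : a :: a :: (List.replicate n a ++ x :: xs) = List.replicate (n+2) a ++ x :: xs := by
      simp [List.replicate_succ]
    rw [h3]
    simp only [countTriples]
    rw [if_pos (by simp), h2, ih]
    push_cast; omega

theorem replicate_append_cons {α : Type} (a : α) (n : Nat) (xs : List α) :
    List.replicate n a ++ a :: xs = List.replicate (n+1) a ++ xs := by
  rw [List.replicate_succ']
  simp

theorem countTriples_runAux {α : Type} [DecidableEq α] :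
    ∀ (xs : List α) (a : α) (n : Nat), 1 ≤ n →
    countTriples (List.replicate n a ++ xs)
      = ((pvRunLengthsAux a n xs).map (fun L => max ((L : Int) - 2) 0)).sum
  | [], a, n, _ => by simp [pvRunLengthsAux, countTriples_replicate]
  | x :: xs, a, n, hn => by
    by_cases h : x = a
    · subst h
      rw [replicate_append_cons]
      rw [countTriples_runAux xs x (n+1) (by omega)]
      simp [pvRunLengthsAux]
    · have hax : a ≠ x := fun e => h e.symm
      rw [countTriples_boundary a x xs hax n]
      have : countTriples (x :: xs) = countTriples (List.replicate 1 x ++ xs) := by simp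
      rw [this, countTriples_runAux xs x 1 (by omega)]
      simp [pvRunLengthsAux, h]

theorem countTriples_runs {α : Type} [DecidableEq α] (fs : List α) :
    countTriples fs = ((pvRunLengths fs).map (fun L => max ((L : Int) - 2) 0)).sum := by
  cases fs with
  | nil => simp [countTriples, pvRunLengths]
  | cons x t =>
    have := countTriples_runAux t x 1 (by omega)
    simpa [pvRunLengths] using this

-- the triple-window count over indices equals countTriples
theorem countP_range_triples {α : Type} [DecidableEq α] :
    ∀ (fs : List α),
    ((List.range (fs.length - 2)).countP
        (fun k => decide (fs[k]? = fs[k+1]? ∧ fs[k+1]? = fs[k+2]?)) : Int) = countTriples fs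
  | [] => by simp [countTriples]
  | [a] => by simp [countTriples]
  | [a, b] => by simp [countTriples]
  | a :: b :: c :: rest => by
    have ih := countP_range_triples (b :: c :: rest)
    have hlen : (a :: b :: c :: rest).length - 2 = ((b :: c :: rest).length - 2) + 1 := by
      simp
    rw [hlen, List.range_succ_eq_map, List.countP_cons, List.countP_map]
    have hpred : (List.range ((b :: c :: rest).length - 2)).countP
        ((fun k => decide ((a :: b :: c :: rest)[k]? = (a :: b :: c :: rest)[k+1]?
            ∧ (a :: b :: c :: rest)[k+1]? = (a :: b :: c :: rest)[k+2]?)) ∘ Nat.succ)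
        = (List.range ((b :: c :: rest).length - 2)).countP
        (fun k => decide ((b :: c :: rest)[k]? = (b :: c :: rest)[k+1]?
            ∧ (b :: c :: rest)[k+1]? = (b :: c :: rest)[k+2]?)) :=
      List.countP_congr (by
        intro k _
        simp [Function.comp, Nat.succ_eq_add_one])
    rw [hpred]
    push_cast
    rw [ih]
    simp only [countTriples, List.getElem?_cons_zero, List.getElem?_cons_succ,
      Option.some.injEq]
    by_cases hab : a = b ∧ b = c
    · rw [if_pos hab, if_pos (by simpa using hab)]
      ring
    · rw [if_neg hab, if_neg (by simpa using hab)]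
      ring

-- A's window condition at an in-range index k is the triple condition on first chars
theorem allit_count_eq (words : List String) :
    (((PySem.List.pyRange 0 ((words.length : Int) - 2) 1).countP
        (fun i => decide (pvFirst words i = pvFirst words (i+1) ∧ pvFirst words (i+1) = pvFirst words (i+2)))) : Int)
      = ((pvRunLengths (words.map (fun w => PySem.Str.pyGet? w 0))).map
          (fun L => max ((L : Int) - 2) 0)).sum := by
  set g : String → Option Char := fun w => PySem.Str.pyGet? w 0 with hg
  set fs : List (Option Char) := words.map g with hfs
  have hlen : fs.length = words.length := by simp [hfs]
  rw [← countTriples_runs fs, ← countP_range_triples fs]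
  congr 1
  rw [PySem.List.pyRange_one, List.countP_map]
  have hN : (((words.length : Int) - 2) - 0).toNat = fs.length - 2 := by
    rw [hlen]; omega
  rw [hN]
  apply List.countP_congr
  intro k hk
  have hk3 : k + 2 < words.length := by
    have hm := List.mem_range.mp hk
    omega
  have hA : ∀ (j : Nat) (hj : j < words.length), pvFirst words ((j : Int)) = g (words[j]'hj) := by
    intro j hj
    simp only [pvFirst, PySem.List.pyGet?_natCast, List.getElem?_eq_getElem hj,
      Option.bind_some]
    rw [hg]
  have hF : ∀ (j : Nat) (hj : j < words.length), fs[j]? = some (g (words[j]'hj)) := by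
    intro j hj
    simp [hfs, List.getElem?_eq_getElem hj]
  have c0 : (0 : Int) + (k : Nat) = ((k : Nat) : Int) := by omega
  have c1 : ((k : Nat) : Int) + 1 = (((k+1) : Nat) : Int) := by omega
  have c2 : ((k : Nat) : Int) + 2 = (((k+2) : Nat) : Int) := by omega
  rw [Function.comp_apply, c0, c1, c2]
  rw [hA k (by omega), hA (k+1) (by omega), hA (k+2) (by omega)]
  rw [hF k (by omega), hF (k+1) (by omega), hF (k+2) (by omega)]
  simp

-- the A-side fold as a countP
theorem foldl_count (p : Int → Prop) [DecidablePred p] (l : List Int) :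
    l.foldl (fun d i => if p i then d.modify "alliteration" 0 (· + 1) else d) (mkDev 0)
      = mkDev ((l.countP (fun i => decide (p i)) : Nat) : Int) := by
  rw [foldl_mkDev p l 0]; simp

theorem ab_eq (s : String) : identify_poetic_devices s = identify_poetic_devices_alt s := by
  unfold identify_poetic_devices identify_poetic_devices_alt
  simp only []
  generalize (PySem.Str.split₀ (PySem.Str.lower s)) = words
  have h0 : PySem.Dict.ofList [("alliteration", (0:Int)), ("assonance", 0), ("consonance", 0), ("repetition", 0), ("metaphor", 0)] = mkDev 0 := by
    rfl
  rw [h0, foldl_count, items_insert_mkDev]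
  rw [allit_count_eq words]

-- ===== VERDICT (by name: the statement is the Claim_ definition above) =====
theorem identify_poetic_devices_spec : Claim_equal_identify_poetic_devices := by
  intro s _
  unfold Spec_identify_poetic_devices
  exact ab_eq s
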